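-- pv_equiv track=rewrite | github.com/ZJRen9/m6A-isoSC-seq | code/Fig.3:Nanopore_varient_calling_and_cell_cluster/varixMatrix_to_cellsplit_positive_precentage.py | cellbarcode_list_to_index
-- ===== SOURCE A (Python) =====
-- def cellbarcode_list_to_index(barcodelist,cellid2celltype_dict,valuelist):
-- 	"""
-- 	editingID   AAACCCAAGCCTGGAA-1  AAACCCAAGCTCGCAC-1
-- 	"""
-- 	outdict = {}
-- 	for i in range(len(barcodelist)):
-- 		barcode_i = barcodelist[i]
-- 		try:
-- 			celltype_i = cellid2celltype_dict[barcode_i]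
-- 		except:
-- 			continue
-- 		value_i = valuelist[i]
-- 		##################
-- 		try:
-- 			if value_i >= 1:
-- 				outdict[celltype_i] += 1
-- 			else:
-- 				outdict[celltype_i] += 0
-- 		except:
-- 			if value_i >= 1:
-- 				outdict[celltype_i] = 1
-- 			else:
-- 				outdict[celltype_i] = 0
-- 		##################
-- 	return outdict
-- ===== SOURCE B (Python) =====
-- def cellbarcode_list_to_index(barcodelist, cellid2celltype_dict, valuelist):
--     # Pass 1: group the values of the matching barcodes by cell type.
--     grouped = {}
--     for i in range(len(barcodelist)):
--         try:
--             celltype = cellid2celltype_dict[barcodelist[i]]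
--         except:
--             continue
--         grouped.setdefault(celltype, []).append(valuelist[i])
--     # Pass 2: count the values >= 1 in each group.
--     return {ct: sum(1 for v in vs if v >= 1) for ct, vs in grouped.items()}
-- ===== Notes on version B (the rewrite author's own statement) =====
-- stated objective: alternative
-- what changed: A interleaves counting with the scan (per-index try/except increment of the running counter); B is two separate passes: first group the matched values into lists per cell type via setdefault, then derive each count from its group with a comprehension.
import Mathlib
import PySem

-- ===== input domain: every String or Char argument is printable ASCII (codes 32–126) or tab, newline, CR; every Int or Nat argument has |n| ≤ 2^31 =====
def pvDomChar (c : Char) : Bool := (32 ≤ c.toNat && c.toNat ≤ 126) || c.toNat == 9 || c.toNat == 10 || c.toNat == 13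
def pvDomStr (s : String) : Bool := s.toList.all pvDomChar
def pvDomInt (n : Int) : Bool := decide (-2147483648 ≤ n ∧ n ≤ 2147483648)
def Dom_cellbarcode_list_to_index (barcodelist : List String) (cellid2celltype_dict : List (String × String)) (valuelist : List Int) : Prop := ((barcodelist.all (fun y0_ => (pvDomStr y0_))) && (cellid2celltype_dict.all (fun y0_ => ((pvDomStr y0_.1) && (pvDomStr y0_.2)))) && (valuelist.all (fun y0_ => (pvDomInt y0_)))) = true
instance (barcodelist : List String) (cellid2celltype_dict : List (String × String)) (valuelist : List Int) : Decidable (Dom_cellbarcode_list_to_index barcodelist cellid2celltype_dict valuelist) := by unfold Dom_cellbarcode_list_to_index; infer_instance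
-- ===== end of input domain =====

-- B replaces A's interleaved try/except counter updates by two passes (group values per cell type, then
-- count the >= 1 values per group); same cost, different decomposition ("alternative").

-- ===== PORT A =====
def cellbarcode_list_to_index (barcodelist : List String) (cellid2celltype_dict : List (String × String)) (valuelist : List Int) : List (String × Int) :=
  ((PySem.List.pyRange 0 (barcodelist.length : Int) 1).foldl
    (fun outdict i =>
      let barcode_i := PySem.List.pyGetD barcodelist i ""
      -- try: celltype_i = cellid2celltype_dict[barcode_i]  except: continue  (first-match lookup)
      match cellid2celltype_dict.find? (fun p => p.1 == barcode_i) with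
      | none => outdict
      | some p =>
        let celltype_i := p.2
        let value_i := PySem.List.pyGetD valuelist i 0   -- IndexError excluded by Pre_
        -- try: outdict[celltype_i] += …  except (KeyError): outdict[celltype_i] = …
        match outdict.get? celltype_i with
        | some c => if value_i ≥ 1 then outdict.insert celltype_i (c + 1) else outdict.insert celltype_i (c + 0)
        | none   => if value_i ≥ 1 then outdict.insert celltype_i 1 else outdict.insert celltype_i 0)
    (PySem.Dict.empty : PySem.Dict String Int)).items

-- ===== PORT B =====
-- sum(1 for v in vs if v >= 1)
def pvPosCount (vs : List Int) : Int :=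
  ((vs.filter (fun v => v ≥ 1)).map (fun _ => (1 : Int))).sum

def cellbarcode_list_to_index_alt (barcodelist : List String) (cellid2celltype_dict : List (String × String)) (valuelist : List Int) : List (String × Int) :=
  -- pass 1: grouped.setdefault(celltype, []).append(valuelist[i])
  let grouped := (PySem.List.pyRange 0 (barcodelist.length : Int) 1).foldl
    (fun grouped i =>
      match cellid2celltype_dict.find? (fun p => p.1 == PySem.List.pyGetD barcodelist i "") with
      | none => grouped
      | some p => grouped.modify p.2 [] (fun vs => vs ++ [PySem.List.pyGetD valuelist i 0]))
    (PySem.Dict.empty : PySem.Dict String (List Int))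
  -- pass 2: {ct: sum(1 for v in vs if v >= 1) for ct, vs in grouped.items()}
  grouped.items.map (fun q => (q.1, pvPosCount q.2))

-- ===== PRECONDITION & SPEC =====
-- Pre_ excludes exactly the inputs where Python A raises IndexError: a barcode at an index beyond
-- len(valuelist) that is a key of the dict (then value_i = valuelist[i] raises).
def Pre_cellbarcode_list_to_index (barcodelist : List String) (cellid2celltype_dict : List (String × String)) (valuelist : List Int) : Prop :=
  ∀ b ∈ barcodelist.drop valuelist.length, b ∉ cellid2celltype_dict.map Prod.fst
instance (barcodelist : List String) (cellid2celltype_dict : List (String × String)) (valuelist : List Int) : Decidable (Pre_cellbarcode_list_to_index barcodelist cellid2celltype_dict valuelist) := by unfold Pre_cellbarcode_list_to_index; infer_instance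

def pvWitness_cellbarcode_list_to_index : List String × (List (String × String)) × List Int :=
  (["aaa", "bbb", "aaa", "zzz"], [("aaa", "T"), ("bbb", "B")], [1, 0, 2, 5])

def Spec_cellbarcode_list_to_index (barcodelist : List String) (cellid2celltype_dict : List (String × String)) (valuelist : List Int) (out : List (String × Int)) : Prop := out = cellbarcode_list_to_index_alt barcodelist cellid2celltype_dict valuelist
instance (barcodelist : List String) (cellid2celltype_dict : List (String × String)) (valuelist : List Int) (out : List (String × Int)) : Decidable (Spec_cellbarcode_list_to_index barcodelist cellid2celltype_dict valuelist out) := by unfold Spec_cellbarcode_list_to_index; infer_instance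

-- ===== CLAIM (what is proved, stated in full; the proofs are below) =====
def Claim_equal_cellbarcode_list_to_index : Prop := ∀ (barcodelist : List String) (cellid2celltype_dict : List (String × String)) (valuelist : List Int), Dom_cellbarcode_list_to_index barcodelist cellid2celltype_dict valuelist → Pre_cellbarcode_list_to_index barcodelist cellid2celltype_dict valuelist → Spec_cellbarcode_list_to_index barcodelist cellid2celltype_dict valuelist (cellbarcode_list_to_index barcodelist cellid2celltype_dict valuelist)

-- ===== LEMMAS AND PROOFS =====

-- map a dict of groups to the dict of their positive counts
def pvMapCnt (d : PySem.Dict String (List Int)) : PySem.Dict String Int :=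
  PySem.Dict.mk (d.items.map (fun q => (q.1, pvPosCount q.2)))

theorem pvPosCount_append_singleton (vs : List Int) (v : Int) :
    pvPosCount (vs ++ [v]) = pvPosCount vs + (if v ≥ 1 then 1 else 0) := by
  by_cases h : v ≥ 1 <;> simp [pvPosCount, List.filter_append, h]

theorem pvMapCnt_get? (d : PySem.Dict String (List Int)) (k : String) :
    (pvMapCnt d).get? k = (d.get? k).map pvPosCount := by
  obtain ⟨l⟩ := d
  induction l with
  | nil => rfl
  | cons p rest ih =>
    simp only [pvMapCnt, List.map_cons] at *
    rw [PySem.Dict.get?_mk_cons, PySem.Dict.get?_mk_cons]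
    by_cases h : p.1 == k
    · simp [h]
    · simp only [h, if_neg, Bool.false_eq_true, not_false_eq_true]
      exact ih

theorem pvMapCnt_keys (d : PySem.Dict String (List Int)) : (pvMapCnt d).keys = d.keys := by
  simp [pvMapCnt, PySem.Dict.keys]

theorem pvMapCnt_insert (d : PySem.Dict String (List Int)) (k : String) (w : List Int) :
    pvMapCnt (d.insert k w) = (pvMapCnt d).insert k (pvPosCount w) := by
  apply PySem.Dict.ext
  have hc : (pvMapCnt d).contains k = d.contains k := by
    rw [PySem.Dict.contains_eq_decide_mem_keys, PySem.Dict.contains_eq_decide_mem_keys, pvMapCnt_keys]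
  simp only [pvMapCnt] at hc ⊢
  rw [PySem.Dict.items_insert, PySem.Dict.items_insert, hc]
  split_ifs with h
  · simp only [List.map_map]
    apply List.map_congr_left
    intro q _
    by_cases hq : q.1 == k <;> simp [Function.comp, hq]
  · simp

-- the per-index steps of the two loops commute with pvMapCnt
theorem pvStep_comm (cellid2celltype_dict : List (String × String)) (barcodelist : List String)
    (valuelist : List Int) (d : PySem.Dict String (List Int)) (i : Int) :
    (let barcode_i := PySem.List.pyGetD barcodelist i ""
     match cellid2celltype_dict.find? (fun p => p.1 == barcode_i) with
     | none => pvMapCnt d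
     | some p =>
       let celltype_i := p.2
       let value_i := PySem.List.pyGetD valuelist i 0
       match (pvMapCnt d).get? celltype_i with
       | some c => if value_i ≥ 1 then (pvMapCnt d).insert celltype_i (c + 1) else (pvMapCnt d).insert celltype_i (c + 0)
       | none   => if value_i ≥ 1 then (pvMapCnt d).insert celltype_i 1 else (pvMapCnt d).insert celltype_i 0)
    = pvMapCnt
      (match cellid2celltype_dict.find? (fun p => p.1 == PySem.List.pyGetD barcodelist i "") with
       | none => d
       | some p => d.modify p.2 [] (fun vs => vs ++ [PySem.List.pyGetD valuelist i 0])) := by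
  cases hf : cellid2celltype_dict.find? (fun p => p.1 == PySem.List.pyGetD barcodelist i "") with
  | none => simp [hf]
  | some p =>
    simp only [hf, PySem.Dict.modify, pvMapCnt_insert, pvMapCnt_get?]
    rw [PySem.Dict.getD]
    cases hg : d.get? p.2 with
    | none =>
      by_cases hv : PySem.List.pyGetD valuelist i 0 ≥ 1 <;>
        simp [hv, pvPosCount]
    | some vs =>
      by_cases hv : PySem.List.pyGetD valuelist i 0 ≥ 1 <;>
        simp [hv, pvPosCount_append_singleton]

theorem pvFold_comm (cellid2celltype_dict : List (String × String)) (barcodelist : List String)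
    (valuelist : List Int) (idxs : List Int) (d : PySem.Dict String (List Int)) :
    idxs.foldl
      (fun outdict i =>
        let barcode_i := PySem.List.pyGetD barcodelist i ""
        match cellid2celltype_dict.find? (fun p => p.1 == barcode_i) with
        | none => outdict
        | some p =>
          let celltype_i := p.2
          let value_i := PySem.List.pyGetD valuelist i 0
          match outdict.get? celltype_i with
          | some c => if value_i ≥ 1 then outdict.insert celltype_i (c + 1) else outdict.insert celltype_i (c + 0)
          | none   => if value_i ≥ 1 then outdict.insert celltype_i 1 else outdict.insert celltype_i 0)
      (pvMapCnt d)
    = pvMapCnt (idxs.foldl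
        (fun grouped i =>
          match cellid2celltype_dict.find? (fun p => p.1 == PySem.List.pyGetD barcodelist i "") with
          | none => grouped
          | some p => grouped.modify p.2 [] (fun vs => vs ++ [PySem.List.pyGetD valuelist i 0]))
        d) := by
  induction idxs generalizing d with
  | nil => rfl
  | cons i rest ih =>
    simp only [List.foldl_cons]
    rw [pvStep_comm cellid2celltype_dict barcodelist valuelist d i]
    exact ih _

-- ===== VERDICT (by name: the statement is the Claim_ definition above) =====
theorem cellbarcode_list_to_index_spec : Claim_equal_cellbarcode_list_to_index := by
  intro barcodelist cellid2celltype_dict valuelist _ _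
  show cellbarcode_list_to_index _ _ _ = cellbarcode_list_to_index_alt _ _ _
  unfold cellbarcode_list_to_index cellbarcode_list_to_index_alt
  have h0 : (PySem.Dict.empty : PySem.Dict String Int)
      = pvMapCnt (PySem.Dict.empty : PySem.Dict String (List Int)) := rfl
  rw [h0, pvFold_comm]
  rfl
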